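-- pv_equiv track=rewrite | github.com/wiedzmin1414/Kryptografia | lista1zad2v2.py | glibcgen
-- ===== SOURCE A (Python) =====
-- ddd = 2**31-1
--
-- eee = 16807
--
-- fff = 2**32
--
-- def glibcgen(seed,ile):
--     r = [seed]
--     for i in range(30):
--         seed = eee*seed % ddd
--         r.append(seed)
--     for i in range(3):
--         r.append( r[i] )
--     for i in range(310+ile):
--         r.append( (r[i+31] + r[i+3]) % fff)
--     return [i>>1 for i in r[344:] ]
-- ===== SOURCE B (Python) =====
-- ddd = 2**31-1
--
-- eee = 16807
--
-- fff = 2**32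
--
-- def glibcgen(seed, ile):
--     # closed-form modular exponentiation for the LCG seeding, then block-of-3
--     # slice-zip advancement of the lagged-Fibonacci recurrence (the three terms
--     # of a block are mutually independent since both lags are >= 3)
--     r = [seed] + [pow(eee, k, ddd) * seed % ddd for k in range(1, 31)]
--     r += r[:3]
--     need = 310 + ile
--     for _ in range((need + 2) // 3):
--         r += [(a + b) % fff for a, b in zip(r[-31:], r[-3:])]
--     return [v >> 1 for v in r[344:344 + ile]]
-- ===== Notes on version B (the rewrite author's own statement) =====
-- stated objective: alternative
-- what changed: B replaces the 30-step iterated LCG seeding with a closed-form modular exponentiation pow(eee,k,ddd)*seed%ddd, and replaces A's one-element-at-a-time indexed appends with block-of-3 advancement built by zipping the two lag slices r[-31:] and r[-3:] (valid because both lags are >= 3, so the three terms of a block are mutually independent), finally trimming the overshoot with one slice.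
import Mathlib
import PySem

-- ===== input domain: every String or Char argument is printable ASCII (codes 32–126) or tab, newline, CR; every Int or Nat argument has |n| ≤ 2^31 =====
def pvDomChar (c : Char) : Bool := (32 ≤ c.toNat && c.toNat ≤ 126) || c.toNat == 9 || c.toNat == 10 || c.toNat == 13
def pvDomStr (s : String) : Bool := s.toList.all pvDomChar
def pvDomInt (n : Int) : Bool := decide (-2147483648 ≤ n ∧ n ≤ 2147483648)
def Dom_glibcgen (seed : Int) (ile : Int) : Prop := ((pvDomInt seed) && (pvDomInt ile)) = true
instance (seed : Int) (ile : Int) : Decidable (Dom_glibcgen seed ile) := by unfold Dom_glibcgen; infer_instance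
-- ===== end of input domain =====

-- B seeds the generator by closed-form modular exponentiation instead of A's iterated
-- LCG loop and advances the lagged-Fibonacci recurrence three terms per step by zipping
-- the two lag slices, trimming the overshoot at the end: objective 'alternative'.

def pvDdd : Int := 2 ^ 31 - 1
def pvEee : Int := 16807
def pvFff : Int := 2 ^ 32

-- ===== PORT A =====
-- every pyGetD index below is in range on every reachable state, so the default 0 is never used (exact)
def glibcgen (seed : Int) (ile : Int) : List Int :=
  let st := (PySem.List.pyRange 0 30 1).foldl
    (fun (st : List Int × Int) _ =>
      let s := PySem.Int.mod (pvEee * st.2) pvDdd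
      (st.1 ++ [s], s)) ([seed], seed)
  let r1 := (PySem.List.pyRange 0 3 1).foldl
    (fun r i => r ++ [PySem.List.pyGetD r i 0]) st.1
  let r2 := (PySem.List.pyRange 0 (310 + ile) 1).foldl
    (fun r i =>
      r ++ [PySem.Int.mod (PySem.List.pyGetD r (i + 31) 0 + PySem.List.pyGetD r (i + 3) 0) pvFff]) r1
  (PySem.List.slice r2 (some 344) none).map (fun (i : Int) => i >>> (1 : Nat))

-- ===== PORT B =====
-- pow(eee, k, ddd) is ported as PySem.Int.mod (pvEee ^ k.toNat) pvDdd (k ≥ 1 here, exact)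
def glibcgen_alt (seed : Int) (ile : Int) : List Int :=
  let r0 := [seed] ++ (PySem.List.pyRange 1 31 1).map
    (fun k => PySem.Int.mod (PySem.Int.mod (pvEee ^ k.toNat) pvDdd * seed) pvDdd)
  let r1 := r0 ++ PySem.List.slice r0 none (some 3)
  let need := 310 + ile
  let r2 := (PySem.List.pyRange 0 (PySem.Int.floordiv (need + 2) 3) 1).foldl
    (fun r _ =>
      r ++ (List.zip (PySem.List.slice r (some (-31)) none)
                     (PySem.List.slice r (some (-3)) none)).map
            (fun p => PySem.Int.mod (p.1 + p.2) pvFff)) r1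
  (PySem.List.slice r2 (some 344) (some (344 + ile))).map (fun (v : Int) => v >>> (1 : Nat))

-- ===== PRECONDITION & SPEC =====
def Spec_glibcgen (seed : Int) (ile : Int) (out : List Int) : Prop := out = glibcgen_alt seed ile
instance (seed : Int) (ile : Int) (out : List Int) : Decidable (Spec_glibcgen seed ile out) := by unfold Spec_glibcgen; infer_instance

-- ===== CLAIM (what is proved, stated in full; the proofs are below) =====
def Claim_equal_glibcgen : Prop := ∀ (seed : Int) (ile : Int), Dom_glibcgen seed ile → Spec_glibcgen seed ile (glibcgen seed ile)

-- ===== LEMMAS AND PROOFS =====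

-- the LCG prefix: pvLcg seed k = value of `seed` after k iterations of the first loop
def pvLcg (seed : Int) : Nat → Int
  | 0 => seed
  | k + 1 => PySem.Int.mod (pvEee * pvLcg seed k) pvDdd

def pvInit (seed : Int) : List Int := (List.range 31).map (pvLcg seed)

def pvBase (seed : Int) : List Int :=
  pvInit seed ++ [pvLcg seed 0, pvLcg seed 1, pvLcg seed 2]

-- A's history list after n iterations of the third loop
def pvRA (seed : Int) : Nat → List Int
  | 0 => pvBase seed
  | n + 1 => pvRA seed n ++
      [PySem.Int.mod (PySem.List.pyGetD (pvRA seed n) ((n : Int) + 31) 0 +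
        PySem.List.pyGetD (pvRA seed n) ((n : Int) + 3) 0) pvFff]

-- the shared first loop computes the LCG orbit
theorem pv_lcgFold (seed : Int) (l : List Int) (acc : List Int) (k : Nat) :
    l.foldl (fun (st : List Int × Int) _ =>
        (st.1 ++ [PySem.Int.mod (pvEee * st.2) pvDdd], PySem.Int.mod (pvEee * st.2) pvDdd))
      (acc, pvLcg seed k)
    = (acc ++ (List.range l.length).map (fun j => pvLcg seed (k + 1 + j)),
       pvLcg seed (k + l.length)) := by
  induction l generalizing acc k with
  | nil => simp
  | cons x xs ih =>
    simp only [List.foldl_cons]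
    have h : PySem.Int.mod (pvEee * pvLcg seed k) pvDdd = pvLcg seed (k + 1) := rfl
    rw [h, ih (acc ++ [pvLcg seed (k + 1)]) (k + 1)]
    simp [List.range_succ_eq_map, List.map_map, Function.comp_def, List.append_assoc,
      Nat.add_comm, Nat.add_left_comm]

theorem pv_initFold (seed : Int) :
    (PySem.List.pyRange 0 30 1).foldl
      (fun (st : List Int × Int) _ =>
        (st.1 ++ [PySem.Int.mod (pvEee * st.2) pvDdd], PySem.Int.mod (pvEee * st.2) pvDdd))
      ([seed], seed)
    = (pvInit seed, pvLcg seed 30) := by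
  have h := pv_lcgFold seed (PySem.List.pyRange 0 30 1) [seed] 0
  have hlen : (PySem.List.pyRange 0 30 1).length = 30 := by
    rw [PySem.List.length_pyRange_one]; decide
  rw [hlen] at h
  rw [show ((([seed], seed)) : List Int × Int) = ([seed], pvLcg seed 0) from by simp [pvLcg], h]
  unfold pvInit
  simp [show (31 : Nat) = 30 + 1 from rfl, List.range_succ_eq_map, Nat.add_comm, pvLcg]

theorem pv_base (seed : Int) :
    (PySem.List.pyRange 0 3 1).foldl
      (fun r i => r ++ [PySem.List.pyGetD r i 0]) (pvInit seed)
    = pvBase seed := by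
  rw [show PySem.List.pyRange 0 3 1 = [0, 1, 2] from by decide]
  simp only [List.foldl_cons, List.foldl_nil]
  have g : ∀ (L : List Int) (k : Nat), k < 31 →
      PySem.List.pyGetD (pvInit seed ++ L) (k : Int) 0 = pvLcg seed k := by
    intro L k hk
    rw [PySem.List.pyGetD_natCast]
    rw [List.getD_append _ _ _ _ (by simp [pvInit]; omega)]
    simp [pvInit, List.getD_eq_getElem?_getD, hk]
  have g0 := g [] 0 (by omega)
  have g1 := g [pvLcg seed 0] 1 (by omega)
  have g2 := g [pvLcg seed 0, pvLcg seed 1] 2 (by omega)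
  simp only [List.append_nil] at g0
  norm_num at g0 g1 g2
  rw [g0, g1, show ((pvInit seed ++ [pvLcg seed 0]) ++ [pvLcg seed 1]) = pvInit seed ++ [pvLcg seed 0, pvLcg seed 1] from by simp, g2]
  simp [pvBase]

theorem pv_length_RA (seed : Int) (n : Nat) : (pvRA seed n).length = 34 + n := by
  induction n with
  | zero => simp [pvRA, pvBase, pvInit]
  | succ n ih => simp [pvRA, ih]; omega

theorem pv_RA_prefix (seed : Int) (n m : Nat) (h : n ≤ m) :
    ∃ t, pvRA seed m = pvRA seed n ++ t := by
  induction m, h using Nat.le_induction with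
  | base => exact ⟨[], (List.append_nil _).symm⟩
  | succ m hm ih =>
    obtain ⟨t, ht⟩ := ih
    exact ⟨t ++ _, by rw [show pvRA seed (m+1) = pvRA seed m ++ _ from rfl, ht, List.append_assoc]⟩

theorem pv_thirdFold (seed : Int) (N : Nat) :
    (List.range N).foldl
      (fun r (k : Nat) =>
        r ++ [PySem.Int.mod (PySem.List.pyGetD r ((k : Int) + 31) 0 +
          PySem.List.pyGetD r ((k : Int) + 3) 0) pvFff]) (pvBase seed)
    = pvRA seed N := by
  induction N with
  | zero => rfl
  | succ n ih => rw [List.range_succ, List.foldl_append, ih]; rfl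

-- closed form for the LCG orbit (B's pow(eee, k, ddd))
theorem pv_mulemod (a b : Int) :
    (a % (2147483647 : Int) * b) % 2147483647 = (a * b) % 2147483647 := by
  conv_rhs => rw [Int.mul_emod]
  conv_lhs => rw [Int.mul_emod]
  rw [Int.emod_emod_of_dvd _ dvd_rfl]

theorem pv_lcg_emod (seed : Int) (k : Nat) :
    pvLcg seed (k + 1) = (pvEee ^ (k + 1) * seed) % (2147483647 : Int) := by
  induction k with
  | zero =>
    show PySem.Int.mod (pvEee * seed) pvDdd = _
    rw [PySem.Int.mod_eq_emod_of_pos (by norm_num [pvDdd])]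
    norm_num [pvDdd]
  | succ k ih =>
    show PySem.Int.mod (pvEee * pvLcg seed (k + 1)) pvDdd = _
    rw [PySem.Int.mod_eq_emod_of_pos (by norm_num [pvDdd]), ih]
    have h : pvEee ^ (k + 1 + 1) * seed = pvEee * (pvEee ^ (k + 1) * seed) := by ring
    rw [h, show pvDdd = (2147483647 : Int) from by norm_num [pvDdd]]
    rw [Int.mul_emod, Int.emod_emod_of_dvd _ dvd_rfl, ← Int.mul_emod]

theorem pv_closed (seed : Int) (k : Nat) :
    PySem.Int.mod (PySem.Int.mod (pvEee ^ (k + 1)) pvDdd * seed) pvDdd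
    = pvLcg seed (k + 1) := by
  rw [PySem.Int.mod_eq_emod_of_pos (by norm_num [pvDdd]),
      PySem.Int.mod_eq_emod_of_pos (by norm_num [pvDdd]), pv_lcg_emod,
      show pvDdd = (2147483647 : Int) from by norm_num [pvDdd], pv_mulemod]

-- B's seeding comprehension builds pvInit
theorem pv_init_alt (seed : Int) :
    [seed] ++ (PySem.List.pyRange 1 31 1).map
      (fun k => PySem.Int.mod (PySem.Int.mod (pvEee ^ k.toNat) pvDdd * seed) pvDdd)
    = pvInit seed := by
  unfold pvInit
  rw [show (31 : Nat) = 30 + 1 from rfl, List.range_succ_eq_map, List.map_cons,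
      PySem.List.pyRange_one, show ((31 : Int) - 1).toNat = 30 from rfl, List.map_map,
      show pvLcg seed 0 = seed from rfl, List.singleton_append]
  rw [List.map_map]
  congr 1
  apply List.map_congr_left
  intro j hj
  simp only [Function.comp_apply]
  rw [show ((1 : Int) + (j : Int)).toNat = j + 1 from by omega]
  exact pv_closed seed j

-- B's mirror slice equals A's three copied elements
theorem pv_mirror (seed : Int) :
    pvInit seed ++ PySem.List.slice (pvInit seed) none (some 3) = pvBase seed := by
  have h : PySem.List.slice (pvInit seed) none (some 3)
      = [pvLcg seed 0, pvLcg seed 1, pvLcg seed 2] := by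
    rw [PySem.List.slice_to _ (by norm_num), show ((3 : Int)).toNat = 3 from rfl]
    unfold pvInit
    rw [← List.map_take, List.take_range, show min 3 31 = 3 from rfl,
        show List.range 3 = [0, 1, 2] from by decide]
    rfl
  rw [h]
  rfl

theorem pv_len3 (l : List Int) (h : l.length = 3) :
    l = [l.getD 0 0, l.getD 1 0, l.getD 2 0] := by
  rcases l with _ | ⟨a, _ | ⟨b, _ | ⟨c, _ | ⟨d, t⟩⟩⟩⟩ <;> simp_all [List.getD]

theorem pv_getD_drop (l : List Int) (k j : Nat) :
    (l.drop k).getD j 0 = l.getD (k + j) 0 := by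
  simp [List.getD_eq_getElem?_getD, List.getElem?_drop]

-- one block of B's loop performs three steps of A's recurrence
theorem pv_chunk (seed : Int) (n : Nat) :
    pvRA seed n ++ (List.zip (PySem.List.slice (pvRA seed n) (some (-31)) none)
        (PySem.List.slice (pvRA seed n) (some (-3)) none)).map
          (fun p => PySem.Int.mod (p.1 + p.2) pvFff)
    = pvRA seed (n + 3) := by
  have hlen := pv_length_RA seed n
  set r := pvRA seed n with hr
  have h31 : PySem.List.slice r (some (-31)) none = r.drop (n + 3) := by
    rw [PySem.List.slice_from_neg_ofNat r 31 (by omega), hlen]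
    congr 1; omega
  have h3 : PySem.List.slice r (some (-3)) none = r.drop (n + 31) := by
    rw [PySem.List.slice_from_neg_ofNat r 3 (by omega), hlen]
    congr 1; omega
  have hlen3 : (r.drop (n + 31)).length = 3 := by rw [List.length_drop, hlen]; omega
  have hd31 : r.drop (n + 31) = [r.getD (n + 31) 0, r.getD (n + 32) 0, r.getD (n + 33) 0] := by
    rw [pv_len3 _ hlen3, pv_getD_drop, pv_getD_drop, pv_getD_drop]
  have hsplit : r.drop (n + 3) = (r.drop (n + 3)).take 3 ++ (r.drop (n + 3)).drop 3 :=
    (List.take_append_drop 3 _).symm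
  have hlentake : ((r.drop (n + 3)).take 3).length = 3 := by
    rw [List.length_take, List.length_drop, hlen]; omega
  have htake : (r.drop (n + 3)).take 3
      = [r.getD (n + 3) 0, r.getD (n + 4) 0, r.getD (n + 5) 0] := by
    rw [pv_len3 _ hlentake]
    congr 1
    · simp [List.getD_eq_getElem?_getD, List.getElem?_drop]
    congr 1
    · simp [List.getD_eq_getElem?_getD, List.getElem?_drop]
    · simp [List.getD_eq_getElem?_getD, List.getElem?_drop]
  have hzip : List.zip (r.drop (n + 3)) (r.drop (n + 31))
      = [(r.getD (n + 3) 0, r.getD (n + 31) 0), (r.getD (n + 4) 0, r.getD (n + 32) 0),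
         (r.getD (n + 5) 0, r.getD (n + 33) 0)] := by
    rw [hsplit, hd31, show ([r.getD (n+31) 0, r.getD (n+32) 0, r.getD (n+33) 0] : List Int)
        = [r.getD (n+31) 0, r.getD (n+32) 0, r.getD (n+33) 0] ++ [] from by simp]
    rw [List.zip_append (by rw [hlentake]; rfl)]
    rw [htake]
    simp [List.zip]
  rw [h31, h3, hzip]
  -- now unfold three steps of pvRA on the right
  have e0 : pvRA seed (n + 1) = r ++
      [PySem.Int.mod (r.getD (n + 31) 0 + r.getD (n + 3) 0) pvFff] := by
    show r ++ _ = _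
    congr 2
    rw [show ((n : Int) + 31) = ((n + 31 : Nat) : Int) from by push_cast; ring,
        show ((n : Int) + 3) = ((n + 3 : Nat) : Int) from by push_cast; ring,
        PySem.List.pyGetD_natCast, PySem.List.pyGetD_natCast]
  have g1 : ∀ j : Nat, j < 34 + n → (pvRA seed (n + 1)).getD j 0 = r.getD j 0 := by
    intro j hj
    rw [e0, List.getD_append _ _ _ _ (by rw [hr, hlen]; omega)]
  have e1 : pvRA seed (n + 2) = pvRA seed (n + 1) ++
      [PySem.Int.mod (r.getD (n + 32) 0 + r.getD (n + 4) 0) pvFff] := by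
    show pvRA seed (n + 1) ++ _ = _
    congr 2
    rw [show (((n + 1 : Nat) : Int) + 31) = ((n + 32 : Nat) : Int) from by push_cast; ring,
        show (((n + 1 : Nat) : Int) + 3) = ((n + 4 : Nat) : Int) from by push_cast; ring,
        PySem.List.pyGetD_natCast, PySem.List.pyGetD_natCast,
        g1 (n + 32) (by omega), g1 (n + 4) (by omega)]
  have g2 : ∀ j : Nat, j < 34 + n → (pvRA seed (n + 2)).getD j 0 = r.getD j 0 := by
    intro j hj
    rw [e1, List.getD_append _ _ _ _ (by rw [pv_length_RA]; omega)]
    exact g1 j hj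
  have e2 : pvRA seed (n + 3) = pvRA seed (n + 2) ++
      [PySem.Int.mod (r.getD (n + 33) 0 + r.getD (n + 5) 0) pvFff] := by
    show pvRA seed (n + 2) ++ _ = _
    congr 2
    rw [show (((n + 2 : Nat) : Int) + 31) = ((n + 33 : Nat) : Int) from by push_cast; ring,
        show (((n + 2 : Nat) : Int) + 3) = ((n + 5 : Nat) : Int) from by push_cast; ring,
        PySem.List.pyGetD_natCast, PySem.List.pyGetD_natCast,
        g2 (n + 33) (by omega), g2 (n + 5) (by omega)]
  rw [e2, e1, e0]
  simp only [List.map_cons, List.map_nil, List.append_assoc, List.cons_append, List.nil_append]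
  congr 1
  rw [Int.add_comm (r.getD (n + 3) 0) (r.getD (n + 31) 0),
      Int.add_comm (r.getD (n + 4) 0) (r.getD (n + 32) 0),
      Int.add_comm (r.getD (n + 5) 0) (r.getD (n + 33) 0)]

-- B's loop, run c times, reaches pvRA seed (3*c)
theorem pv_chunkFold (seed : Int) (c : Nat) :
    (List.range c).foldl
      (fun r (_ : Nat) =>
        r ++ (List.zip (PySem.List.slice r (some (-31)) none)
                       (PySem.List.slice r (some (-3)) none)).map
              (fun p => PySem.Int.mod (p.1 + p.2) pvFff)) (pvBase seed)
    = pvRA seed (3 * c) := by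
  induction c with
  | zero => rfl
  | succ c ih =>
    rw [List.range_succ, List.foldl_append, ih]
    simp only [List.foldl_cons, List.foldl_nil]
    rw [pv_chunk seed (3 * c)]
    congr 1

-- the final trimmed slice of the (possibly overshooting) block run equals A's tail
theorem pv_final (seed : Int) (ile : Int) :
    PySem.List.slice (pvRA seed (3 * (PySem.Int.floordiv (310 + ile + 2) 3).toNat))
      (some 344) (some (344 + ile))
    = (pvRA seed (310 + ile).toNat).drop 344 := by
  rw [PySem.Int.floordiv_eq_ediv_of_pos (by norm_num)]
  set C : Nat := ((310 + ile + 2) / 3).toNat with hC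
  set N : Nat := (310 + ile).toNat with hN
  by_cases hpos : 1 ≤ ile
  · have hb1 : N ≤ 3 * C := by omega
    have hb2 : 3 * C ≤ N + 2 := by omega
    obtain ⟨t, ht⟩ := pv_RA_prefix seed N (3 * C) hb1
    rw [ht]
    rw [PySem.List.slice_toNat _ (by norm_num) (by omega)]
    rw [show ((344 : Int)).toNat = 344 from rfl,
        show ((344 + ile).toNat - 344) = ile.toNat from by omega]
    rw [List.drop_append, pv_length_RA, show 344 - (34 + N) = 0 from by omega, List.drop_zero]
    have hdl : ((pvRA seed N).drop 344).length = ile.toNat := by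
      rw [List.length_drop, pv_length_RA]; omega
    rw [List.take_left' hdl]
  · -- ile ≤ 0: both sides are empty
    have hnil : (pvRA seed N).drop 344 = [] :=
      List.drop_eq_nil_of_le (by rw [pv_length_RA]; omega)
    rw [hnil]
    apply List.eq_nil_of_length_eq_zero
    rw [PySem.List.length_slice, pv_length_RA]
    have hle := PySem.List.clampIdx_le (34 + 3 * C) (344 + ile)
    by_cases h0 : ile = 0
    · rw [h0]; simp
    · have hlen : 34 + 3 * C ≤ 343 := by omega
      have h344 : PySem.List.clampIdx (34 + 3 * C) 344 = 34 + 3 * C := by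
        rw [show ((344 : Int)) = ((344 : Nat) : Int) from rfl, PySem.List.clampIdx_natCast]
        omega
      omega

-- ===== VERDICT (by name: the statement is the Claim_ definition above) =====
theorem glibcgen_spec : Claim_equal_glibcgen := by
  unfold Claim_equal_glibcgen Spec_glibcgen
  intro seed ile _
  unfold glibcgen glibcgen_alt
  dsimp only
  rw [pv_initFold seed]
  dsimp only
  rw [pv_base seed, pv_init_alt seed, pv_mirror seed]
  rw [PySem.List.pyRange_one 0 (310 + ile), PySem.List.pyRange_one 0 (PySem.Int.floordiv (310 + ile + 2) 3)]
  simp only [Int.sub_zero, zero_add]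
  rw [List.foldl_map, List.foldl_map]
  rw [pv_thirdFold seed ((310 + ile).toNat), pv_chunkFold seed ((PySem.Int.floordiv (310 + ile + 2) 3).toNat)]
  rw [PySem.List.slice_from _ (by norm_num)]
  rw [pv_final seed ile]
  rfl
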